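-- pv_equiv track=rewrite | github.com/AdamZhouSE/pythonHomework | Code/CodeRecords/2374/60691/312247.py | function
-- ===== SOURCE A (Python) =====
-- def function(l):
--     l1 = []
--     for i in range(len(l)):
--         if not l[i] in l1:
--             l1.append(l[i])
--
--     lresult = [[]for i in range(len(l1))]
--     for i in range(len(l1)):
--         lresult[i].append(l1[i])
--         lresult[i].append(l.count(l1[i]))
--
--     lresult.sort(key=lambda x: x[1], reverse=True)
--
--     ltemp = []
--     for i in range(len(lresult)):
--         for j in range(lresult[i][1]):
--             ltemp.append(lresult[i][0])
--     return ltemp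
-- ===== SOURCE B (Python) =====
-- def function(l):
--     # counting step kept as in the task: uniques in first-appearance order, counts via l.count
--     l1 = []
--     for x in l:
--         if x not in l1:
--             l1.append(x)
--     pairs = [(x, l.count(x)) for x in l1]
--     counts = [c for _, c in pairs]
--     max_count = max(counts) if counts else 0
--     buckets = [[] for _ in range(max_count + 1)]
--     for x, c in pairs:
--         buckets[c].append(x)
--     result = []
--     for c in range(max_count, 0, -1):
--         for x in buckets[c]:
--             result.extend([x] * c)
--     return result
-- ===== Notes on version B (the rewrite author's own statement) =====
-- stated objective: alternative
-- what changed: A stably sorts the (element, count) pairs by count descending with a comparison sort and then expands; B keeps the same counting step but replaces the sort by a counting/bucket sort: uniques are appended to buckets[count] and buckets are emitted from max_count down to 1.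
import Mathlib
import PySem

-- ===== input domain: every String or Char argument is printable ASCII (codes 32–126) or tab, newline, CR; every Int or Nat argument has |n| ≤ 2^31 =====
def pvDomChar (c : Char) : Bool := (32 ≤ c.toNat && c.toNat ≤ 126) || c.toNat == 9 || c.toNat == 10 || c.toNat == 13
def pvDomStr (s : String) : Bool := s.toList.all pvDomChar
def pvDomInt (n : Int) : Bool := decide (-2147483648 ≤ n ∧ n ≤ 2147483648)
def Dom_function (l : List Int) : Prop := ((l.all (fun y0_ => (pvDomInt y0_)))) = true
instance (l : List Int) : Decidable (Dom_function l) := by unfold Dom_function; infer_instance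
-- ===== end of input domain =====

-- B replaces A's stable comparison sort of the (element, count) pairs by a counting/bucket
-- sort (buckets indexed by count, emitted from max_count down to 1); objective: alternative.

-- ===== PORT A =====
-- dedup in first-appearance order, pair each unique with its count, stable sort by count
-- descending (sorted(key=..., reverse=True)), then expand each pair count times
def function (l : List Int) : List Int :=
  let l1 := l.foldl (fun acc x => if acc.contains x then acc else acc ++ [x]) []
  let lresult := l1.foldl (fun acc x => acc ++ [(x, PySem.List.count l x)]) []
  let sortedR := PySem.List.sorted lresult (fun p => p.2) true
  sortedR.foldl (fun acc p => acc ++ List.replicate p.2 p.1) []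

-- ===== PORT B =====
-- same counting step; then append each unique to buckets[count] and emit the buckets
-- from max_count down to 1, expanding each element count times
def function_alt (l : List Int) : List Int :=
  let l1 := l.foldl (fun acc x => if acc.contains x then acc else acc ++ [x]) []
  let pairs := l1.map (fun x => (x, PySem.List.count l x))
  let maxc := PySem.List.maxD (pairs.map (fun p => p.2)) (fun c => c) 0
  let buckets := pairs.foldl (fun bs p => bs.set p.2 (bs.getD p.2 [] ++ [p.1]))
      (List.replicate (maxc + 1) ([] : List Int))
  (PySem.List.pyRange (maxc : Int) 0 (-1)).foldl
    (fun acc c => (buckets.getD c.toNat []).foldl (fun acc2 x => acc2 ++ List.replicate c.toNat x) acc) []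

-- ===== PRECONDITION & SPEC =====
def Spec_function (l : List Int) (out : List Int) : Prop := out = function_alt l
instance (l : List Int) (out : List Int) : Decidable (Spec_function l out) := by unfold Spec_function; infer_instance

-- ===== CLAIM (what is proved, stated in full; the proofs are below) =====
def Claim_equal_function : Prop := ∀ (l : List Int), Dom_function l → Spec_function l (function l)

-- ===== LEMMAS AND PROOFS =====

-- [n, n-1, …, 1] as a Nat list: the bucket indices in emission order
def descNat : Nat → List Nat
  | 0 => []
  | n + 1 => (n + 1) :: descNat n

theorem mem_descNat (n k : Nat) : k ∈ descNat n ↔ 1 ≤ k ∧ k ≤ n := by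
  induction n with
  | zero => simp [descNat]; omega
  | succ m ih => simp [descNat, ih]; omega

theorem pairwise_descNat (n : Nat) : (descNat n).Pairwise (· > ·) := by
  induction n with
  | zero => simp [descNat]
  | succ m ih =>
    refine List.pairwise_cons.2 ⟨?_, ih⟩
    intro k hk
    have := (mem_descNat m k).1 hk
    omega

theorem descNat_eq_range (n : Nat) : descNat n = (List.range n).map (fun k => n - k) := by
  induction n with
  | zero => simp [descNat]
  | succ m ih =>
    rw [descNat, List.range_succ_eq_map, List.map_cons, List.map_map, ih]
    simp [Function.comp_def]

theorem pyRange_desc (n : Nat) :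
    PySem.List.pyRange (n : Int) 0 (-1) = (descNat n).map (fun k : Nat => (k : Int)) := by
  rw [descNat_eq_range, List.map_map]
  simp only [PySem.List.pyRange]
  norm_num
  by_cases h : 0 < n
  · simp only [if_pos (by exact_mod_cast h)]
    norm_num
    intro a ha
    omega
  · simp [show n = 0 by omega]

-- insertBy passes over a prefix it does not insert before
theorem insertBy_skip {α : Type} (bf : α → α → Bool) (x : α) (m t : List α)
    (h : ∀ y ∈ m, bf x y = false) :
    PySem.List.insertBy bf x (m ++ t) = m ++ PySem.List.insertBy bf x t := by
  induction m with
  | nil => simp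
  | cons y m ih =>
    simp only [List.cons_append, PySem.List.insertBy]
    rw [h y (by simp)]
    simp [ih (fun z hz => h z (by simp [hz]))]

theorem insertBy_front {α : Type} (bf : α → α → Bool) (x : α) (t : List α)
    (h : ∀ y ∈ t, bf x y = true) :
    PySem.List.insertBy bf x t = x :: t := by
  cases t with
  | nil => rfl
  | cons y t => simp [PySem.List.insertBy, h y (by simp)]

-- inserting x into the bucket decomposition appends it to the end of its own bucket
theorem insertBy_buckets (ks : List Nat) (hks : ks.Pairwise (· > ·))
    (x : Int × Nat) (hx : x.2 ∈ ks) (xs : List (Int × Nat)) :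
    PySem.List.insertBy (fun a b => decide (b.2 < a.2)) x
        (ks.flatMap (fun k => xs.filter (fun p => p.2 == k)))
      = ks.flatMap (fun k => (xs ++ [x]).filter (fun p => p.2 == k)) := by
  induction ks with
  | nil => simp at hx
  | cons k ks ih =>
    have hgt : ∀ k' ∈ ks, k' < k := fun k' h' => (List.pairwise_cons.1 hks).1 k' h'
    simp only [List.flatMap_cons]
    by_cases hxk : x.2 = k
    · -- x lands at the end of the first bucket
      have hfk : (xs ++ [x]).filter (fun p => p.2 == k) = xs.filter (fun p => p.2 == k) ++ [x] := by
        simp [List.filter_append, hxk]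
      have hrest : ∀ k' ∈ ks, (xs ++ [x]).filter (fun p => p.2 == k') = xs.filter (fun p => p.2 == k') := by
        intro k' h'
        have := hgt k' h'
        simp [List.filter_append]
        omega
      rw [insertBy_skip _ _ _ _ (by
        intro y hy
        simp only [List.mem_filter, beq_iff_eq] at hy
        simp [hy.2, hxk])]
      rw [insertBy_front _ _ _ (by
        intro y hy
        simp only [List.mem_flatMap, List.mem_filter, beq_iff_eq] at hy
        obtain ⟨k', hk', _, hy2⟩ := hy
        simp [hy2, hxk]
        exact hgt k' hk')]
      rw [hfk, List.flatMap_congr hrest]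
      simp
    · -- x belongs to a later bucket; it passes the whole first bucket
      have hx' : x.2 ∈ ks := (List.mem_cons.1 hx).resolve_left hxk
      have hfk : (xs ++ [x]).filter (fun p => p.2 == k) = xs.filter (fun p => p.2 == k) := by
        simp [List.filter_append]
        omega
      rw [insertBy_skip _ _ _ _ (by
        intro y hy
        simp only [List.mem_filter, beq_iff_eq] at hy
        have : x.2 < k := hgt _ hx'
        simp [hy.2]
        omega)]
      rw [ih (List.Pairwise.of_cons hks) hx', hfk]

-- the stable descending sort IS the bucket decomposition (buckets read high key to low)
theorem sorted_buckets (ks : List Nat) (hks : ks.Pairwise (· > ·)) (xs : List (Int × Nat))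
    (hall : ∀ p ∈ xs, p.2 ∈ ks) :
    PySem.List.sorted xs (fun p => p.2) true
      = ks.flatMap (fun k => xs.filter (fun p => p.2 == k)) := by
  induction xs using List.reverseRecOn with
  | nil => simp [PySem.List.sorted]
  | append_singleton xs x ih =>
    have h1 : PySem.List.sorted (xs ++ [x]) (fun p => p.2) true
        = PySem.List.insertBy (fun a b => decide (b.2 < a.2)) x
            (PySem.List.sorted xs (fun p => p.2) true) := by
      simp [PySem.List.sorted, List.foldl_append]
    rw [h1, ih (fun p hp => hall p (by simp [hp])),
      insertBy_buckets ks hks x (hall x (by simp)) xs]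

-- the bucket fold puts each pair's element at the end of bucket #count
theorem buckets_getD (ps : List (Int × Nat)) (bs : List (List Int))
    (h : ∀ p ∈ ps, p.2 < bs.length) (c : Nat) (hc : c < bs.length) :
    (ps.foldl (fun bs p => bs.set p.2 (bs.getD p.2 [] ++ [p.1])) bs).getD c []
      = bs.getD c [] ++ (ps.filter (fun p => p.2 == c)).map (fun p => p.1) := by
  induction ps generalizing bs with
  | nil => simp
  | cons p ps ih =>
    simp only [List.foldl_cons, List.filter_cons]
    rw [ih _ (fun q hq => by simp only [List.length_set]; exact h q (List.mem_cons_of_mem _ hq))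
        (by simp only [List.length_set]; exact hc)]
    by_cases hpc : p.2 = c
    · simp only [hpc, beq_self_eq_true, if_pos, List.map_cons]
      simp [List.getD_eq_getElem?_getD, hc]
    · rw [if_neg (by simpa using hpc)]
      congr 1
      simp [List.getD_eq_getElem?_getD, List.getElem?_set_ne hpc]

theorem mem_dedup_sub (l : List Int) (acc : List Int) (x : Int)
    (hx : x ∈ l.foldl (fun acc x => if acc.contains x then acc else acc ++ [x]) acc) :
    x ∈ acc ∨ x ∈ l := by
  induction l generalizing acc with
  | nil => simp_all
  | cons y l ih =>
    simp only [List.foldl_cons] at hx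
    rcases ih _ hx with h | h
    · by_cases hy : acc.contains y <;> simp_all
      rcases h with h | h <;> simp_all
    · simp [h]

theorem max?_cons_cons (a b : Nat) (t : List Nat) :
    PySem.List.max? (a :: b :: t) (fun c => c)
      = PySem.List.max? ((if a < b then b else a) :: t) (fun c => c) := by
  simp only [PySem.List.max?, List.foldl_cons]
  split <;> rfl

theorem max?_cons_some (t : List Nat) : ∀ a, ∃ m, PySem.List.max? (a :: t) (fun c => c) = some m := by
  induction t with
  | nil => exact fun a => ⟨a, rfl⟩
  | cons b t ih =>
    intro a
    rw [max?_cons_cons]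
    exact ih _

theorem maxD_ge (t : List Nat) (c : Nat) (hc : c ∈ t) :
    c ≤ PySem.List.maxD t (fun c => c) 0 := by
  cases t with
  | nil => simp at hc
  | cons a t =>
    obtain ⟨m, hm⟩ := max?_cons_some t a
    have := PySem.List.max?_isMax hm c hc
    simp [PySem.List.maxD, hm]
    exact this

theorem function_eq_alt (l : List Int) : function l = function_alt l := by
  unfold function function_alt
  simp only [PySem.List.foldl_append_singleton_eq_map, List.nil_append]
  set l1 := l.foldl (fun acc x => if acc.contains x then acc else acc ++ [x]) [] with hl1
  set P := l1.map (fun x => (x, PySem.List.count l x)) with hP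
  set maxc := PySem.List.maxD (P.map (fun p => p.2)) (fun c => c) 0 with hmaxc
  have hmem : ∀ x ∈ l1, x ∈ l := by
    intro x hx
    rcases mem_dedup_sub l [] x hx with h | h
    · simp at h
    · exact h
  have hpos : ∀ p ∈ P, 1 ≤ p.2 := by
    intro p hp
    rw [hP] at hp
    obtain ⟨x, hx, rfl⟩ := List.mem_map.1 hp
    simpa [PySem.List.count] using List.count_pos_iff.2 (hmem x hx)
  have hle : ∀ p ∈ P, p.2 ≤ maxc := by
    intro p hp
    exact maxD_ge _ _ (List.mem_map.2 ⟨p, hp, rfl⟩)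
  have hall : ∀ p ∈ P, p.2 ∈ descNat maxc := by
    intro p hp
    exact (mem_descNat _ _).2 ⟨hpos p hp, hle p hp⟩
  rw [sorted_buckets (descNat maxc) (pairwise_descNat _) P hall, pyRange_desc maxc,
    List.foldl_map]
  simp only [Int.toNat_natCast]
  simp only [PySem.List.foldl_append_eq_flatMap, List.nil_append, List.flatMap_assoc]
  apply List.flatMap_congr
  intro k hk
  have hk' : k < maxc + 1 := by have := (mem_descNat _ _).1 hk; omega
  rw [buckets_getD P _ (fun p hp => by simpa using Nat.lt_succ_of_le (hle p hp)) k
      (by simpa using hk'), List.getD_replicate _ hk', List.nil_append, List.flatMap_map]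
  apply List.flatMap_congr
  intro p hp
  have : p.2 = k := by simpa using (List.mem_filter.1 hp).2
  rw [this]

-- ===== VERDICT (by name: the statement is the Claim_ definition above) =====
theorem function_spec : Claim_equal_function := by
  intro l _
  unfold Spec_function
  exact function_eq_alt l
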